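-- pv_equiv track=rewrite | github.com/renderjaviii/bebbled-game | Challenge/UI Game.py | shiftToTheRight
-- ===== SOURCE A (Python) =====
-- def shiftToTheRight(table):
--     for i in range(len(table)):
--         for j in range(len(table)):
--             if table[j][i] != 0:
--                 break
--             elif i != 0 and (j == (len(table) - 1)):
--                 for k in range(len(table)):
--                     for l in reversed(range(1, i + 1)):
--                         table[k][l] = table[k][l - 1]
--                         table[k][l - 1] = 0
--
--     return table
-- ===== SOURCE B (Python) =====
-- def shiftToTheRight(table):
--     n = len(table)
--     nonzero = [c for c in range(n) if any(table[r][c] != 0 for r in range(n))]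
--     for row in table:
--         row[:n] = [0] * (n - len(nonzero)) + [row[c] for c in nonzero]
--     return table
-- ===== Notes on version B (the rewrite author's own statement) =====
-- stated objective: simpler
-- what changed: A repeatedly bubbles each all-zero column to the left by an O(n^2) block shift inside an O(n^2) scan; B classifies the columns once (zero vs non-zero) and rewrites each row's first n cells as zeros followed by the non-zero columns' values in order, in a single pass.
-- outside the precondition, e.g. on shiftToTheRight([[1, 5], [2]]): A returns [[1, 5], [2]], B raises IndexError
import Mathlib
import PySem

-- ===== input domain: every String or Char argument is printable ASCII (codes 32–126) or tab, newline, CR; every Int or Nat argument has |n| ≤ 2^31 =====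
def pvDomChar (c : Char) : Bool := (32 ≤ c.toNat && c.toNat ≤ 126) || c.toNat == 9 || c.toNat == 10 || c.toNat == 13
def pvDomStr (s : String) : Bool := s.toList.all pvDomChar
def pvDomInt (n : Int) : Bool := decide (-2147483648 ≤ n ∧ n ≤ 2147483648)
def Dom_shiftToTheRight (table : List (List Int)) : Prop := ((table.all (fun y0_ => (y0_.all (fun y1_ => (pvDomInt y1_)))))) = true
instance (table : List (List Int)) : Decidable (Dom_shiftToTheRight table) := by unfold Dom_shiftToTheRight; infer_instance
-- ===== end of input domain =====

-- B replaces A's repeated bubble-shifting of zero columns by a single classify-then-rebuild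
-- pass over the rows (simpler); both Pythons mutate `table` in place, the equivalence
-- proved here is about the returned value.


-- ===== PORT A =====
-- the two innermost assignments, applied for l = i, i-1, …, 1 (reversed(range(1, i+1)))
def pvShiftRow (row : List Int) (i : Nat) : List Int :=
  ((List.range' 1 i).reverse).foldl
    (fun r l => (r.set l (r.getD (l - 1) 0)).set (l - 1) 0) row

-- the 'for k in range(len(table))' loop applying the shift to every row
def pvShiftAll (t : List (List Int)) (i : Nat) : List (List Int) :=
  (List.range t.length).foldl (fun s k => s.set k (pvShiftRow (s.getD k []) i)) t

-- the 'for j in range(len(table))' loop with its break / elif, as recursion on the j list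
def pvScan (i : Nat) (t : List (List Int)) : List Nat → List (List Int)
  | [] => t
  | j :: js =>
    if (t.getD j []).getD i 0 ≠ 0 then t
    else if i ≠ 0 ∧ j = t.length - 1 then pvScan i (pvShiftAll t i) js
    else pvScan i t js

def shiftToTheRight (table : List (List Int)) : List (List Int) :=
  (List.range table.length).foldl (fun t i => pvScan i t (List.range t.length)) table

-- ===== PORT B =====
def shiftToTheRight_alt (table : List (List Int)) : List (List Int) :=
  let n := table.length
  let nonzero := (List.range n).filter
    (fun c => (List.range n).any (fun r => (table.getD r []).getD c 0 != 0))
  table.map (fun row =>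
    (List.replicate (n - nonzero.length) 0 ++ nonzero.map (fun c => row.getD c 0)) ++ row.drop n)

-- ===== PRECONDITION & SPEC =====
-- Pre_ excludes ragged tables having a row shorter than the number of rows: there A
-- generally raises IndexError, and returns at all only when an accidental early 'break'
-- (a non-zero entry high in every column) keeps it from reaching the short row.
def Pre_shiftToTheRight (table : List (List Int)) : Prop :=
  ∀ row ∈ table, table.length ≤ row.length
instance (table : List (List Int)) : Decidable (Pre_shiftToTheRight table) := by
  unfold Pre_shiftToTheRight; infer_instance
def pvWitness_shiftToTheRight : List (List Int) := [[0, 3, 0], [0, -1, 0], [0, 4, 0]]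

def Spec_shiftToTheRight (table : List (List Int)) (out : List (List Int)) : Prop :=
  out = shiftToTheRight_alt table
instance (table : List (List Int)) (out : List (List Int)) : Decidable (Spec_shiftToTheRight table out) := by
  unfold Spec_shiftToTheRight; infer_instance

-- ===== CLAIM (what is proved, stated in full; the proofs are below) =====
def Claim_equal_shiftToTheRight : Prop :=
  ∀ (table : List (List Int)), Dom_shiftToTheRight table → Pre_shiftToTheRight table →
    Spec_shiftToTheRight table (shiftToTheRight table)

-- ===== LEMMAS AND PROOFS =====

-- the Boolean "column c has a non-zero entry" test, relative to the ORIGINAL table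
def pvNz (T : List (List Int)) (c : Nat) : Bool :=
  (List.range T.length).any (fun r => (T.getD r []).getD c 0 != 0)

-- shape of a row after the first i columns have been processed by A's outer loop
def pvRowAt (T : List (List Int)) (i : Nat) (row : List Int) : List Int :=
  List.replicate (i - ((List.range i).filter (pvNz T)).length) 0
    ++ ((List.range i).filter (pvNz T)).map (fun c => row.getD c 0)
    ++ row.drop i

theorem pv_getD_append (a b : List Int) (k : Nat) (h : a.length = k) :
    (a ++ b).getD k 0 = b.getD 0 0 := by
  subst h
  simp [List.getD, List.getElem?_append_right]

theorem pv_filter_len_le (T : List (List Int)) (i : Nat) :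
    ((List.range i).filter (pvNz T)).length ≤ i := by
  have := List.length_filter_le (pvNz T) (List.range i)
  simpa using this

theorem pvShiftRow_succ (row : List Int) (k : Nat) :
    pvShiftRow row (k + 1) = pvShiftRow ((row.set (k + 1) (row.getD k 0)).set k 0) k := by
  simp [pvShiftRow, List.range'_concat, Nat.add_comm]

theorem pvShiftRow_eq (i : Nat) (row : List Int) (h1 : 1 ≤ i) (h2 : i + 1 ≤ row.length) :
    pvShiftRow row i = 0 :: (row.take i ++ row.drop (i + 1)) := by
  induction i generalizing row with
  | zero => omega
  | succ k ih =>
    rw [pvShiftRow_succ]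
    by_cases hk : k = 0
    · subst hk
      match row, h2 with
      | a :: b :: rest, _ => simp [pvShiftRow, List.getD]
    · have hk1 : 1 ≤ k := Nat.one_le_iff_ne_zero.mpr hk
      have hklen : k + 2 ≤ row.length := h2
      -- decompose row = take k ++ row[k] :: row[k+1] :: drop (k+2)
      have hkl : k < row.length := by omega
      have hk1l : k + 1 < row.length := by omega
      have hdecomp : row = row.take k ++ row[k] :: row[k+1] :: row.drop (k + 2) := by
        conv_lhs => rw [← List.take_append_drop k row]
        rw [List.drop_eq_getElem_cons hkl, List.drop_eq_getElem_cons hk1l]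
      have htk : (row.take k).length = k := List.length_take_of_le (by omega)
      have hgd : row.getD k 0 = row[k] := by
        simp [List.getD, List.getElem?_eq_getElem hkl]
      have hset : (row.set (k + 1) (row.getD k 0)).set k 0
          = row.take k ++ (0 : Int) :: row.getD k 0 :: row.drop (k + 2) := by
        generalize row.getD k 0 = v
        conv_lhs => rw [hdecomp]
        rw [List.set_append_right _ _ (by omega)]
        simp only [htk, Nat.add_sub_cancel_left, Nat.add_sub_cancel,
          List.set_cons_succ, List.set_cons_zero]
        rw [List.set_append_right _ _ (by omega)]
        simp only [htk, Nat.sub_self, List.set_cons_zero]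
      rw [hset]
      rw [ih _ hk1 (by simp [htk]; try omega)]
      have htake : (row.take k ++ (0 : Int) :: row.getD k 0 :: row.drop (k + 2)).take k = row.take k :=
        List.take_left' htk
      have hdrop : (row.take k ++ (0 : Int) :: row.getD k 0 :: row.drop (k + 2)).drop (k + 1)
          = row.getD k 0 :: row.drop (k + 2) := by
        have hsplit : row.take k ++ (0 : Int) :: row.getD k 0 :: row.drop (k + 2)
            = (row.take k ++ [(0 : Int)]) ++ row.getD k 0 :: row.drop (k + 2) := by simp
        rw [hsplit, List.drop_left' (by simp [htk])]
      rw [htake, hdrop]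
      have hts : row.take (k + 1) = row.take k ++ [row[k]] := by
        rw [List.take_add_one, List.getElem?_eq_getElem hkl]; rfl
      have hfin : List.take (k + 1) row ++ List.drop (k + 2) row
          = List.take k row ++ row[k] :: List.drop (k + 2) row := by
        simp only [hts, List.append_assoc, List.cons_append, List.nil_append]
      rw [hgd]
      show (0 : Int) :: (List.take k row ++ row[k] :: List.drop (k + 2) row)
          = 0 :: (List.take (k + 1) row ++ List.drop (k + 2) row)
      rw [hfin]

theorem pv_foldl_set_map (f : List Int → List Int) (t2 : List (List Int)) :
    ∀ t1 : List (List Int),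
      (List.range' t1.length t2.length).foldl (fun s k => s.set k (f (s.getD k []))) (t1 ++ t2)
        = t1 ++ t2.map f := by
  induction t2 with
  | nil => intro t1; simp
  | cons a t2 ih =>
    intro t1
    rw [List.length_cons, List.range'_succ, List.foldl_cons]
    have h1 : (t1 ++ a :: t2).getD t1.length [] = a := by
      simp [List.getD, List.getElem?_append_right]
    have h2 : (t1 ++ a :: t2).set t1.length (f a) = t1 ++ f a :: t2 := by
      rw [List.set_append_right _ _ (le_refl _)]
      simp
    rw [h1, h2]
    have h3 := ih (t1 ++ [f a])
    simp only [List.length_append, List.length_cons, List.length_nil] at h3 ⊢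
    simpa [List.append_assoc] using h3

theorem pvShiftAll_eq (t : List (List Int)) (i : Nat) :
    pvShiftAll t i = t.map (fun r => pvShiftRow r i) := by
  have := pv_foldl_set_map (fun r => pvShiftRow r i) t []
  simpa [pvShiftAll, List.range_eq_range'] using this

theorem pvScan_exists (i : Nat) (t : List (List Int)) :
    ∀ (k a : Nat), a + k = t.length →
      (∃ j, a ≤ j ∧ j < t.length ∧ (t.getD j []).getD i 0 ≠ 0) →
      pvScan i t (List.range' a k) = t := by
  intro k
  induction k with
  | zero => intro a _ _; simp [pvScan]
  | succ m ih =>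
    intro a hsum hex
    rw [List.range'_succ]
    by_cases hnz : (t.getD a []).getD i 0 ≠ 0
    · show pvScan i t (a :: List.range' (a + 1) m) = t
      rw [pvScan, if_pos hnz]
    · obtain ⟨j, hj1, hj2, hj3⟩ := hex
      have hja : j ≠ a := fun h => hnz (h ▸ hj3)
      have hbranch : ¬ (i ≠ 0 ∧ a = t.length - 1) := by
        rintro ⟨-, ha⟩; omega
      show pvScan i t (a :: List.range' (a + 1) m) = t
      rw [pvScan, if_neg hnz, if_neg hbranch]
      exact ih (a + 1) (by omega) ⟨j, by omega, hj2, hj3⟩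

theorem pvScan_zero_skip (i : Nat) (t : List (List Int)) (hi : i = 0)
    (hz : ∀ j, j < t.length → (t.getD j []).getD i 0 = 0) :
    ∀ (k a : Nat), a + k = t.length → pvScan i t (List.range' a k) = t := by
  intro k
  induction k with
  | zero => intro a _; simp [pvScan]
  | succ m ih =>
    intro a hsum
    rw [List.range'_succ]
    have hnz : ¬ (t.getD a []).getD i 0 ≠ 0 := fun h => h (hz a (by omega))
    have hbranch : ¬ (i ≠ 0 ∧ a = t.length - 1) := by rintro ⟨h, -⟩; exact h hi
    show pvScan i t (a :: List.range' (a + 1) m) = t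
    rw [pvScan, if_neg hnz, if_neg hbranch]
    exact ih (a + 1) (by omega)

theorem pvScan_allzero (i : Nat) (t : List (List Int)) (hi : i ≠ 0)
    (hz : ∀ j, j < t.length → (t.getD j []).getD i 0 = 0) :
    ∀ (k a : Nat), a + k = t.length → 0 < k →
      pvScan i t (List.range' a k) = pvShiftAll t i := by
  intro k
  induction k with
  | zero => intro a _ h; omega
  | succ m ih =>
    intro a hsum _
    rw [List.range'_succ]
    have hnz : ¬ (t.getD a []).getD i 0 ≠ 0 := fun h => h (hz a (by omega))
    show pvScan i t (a :: List.range' (a + 1) m) = pvShiftAll t i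
    rw [pvScan, if_neg hnz]
    rcases Nat.eq_zero_or_pos m with hm | hm
    · subst hm
      have ha : a = t.length - 1 := by omega
      rw [if_pos ⟨hi, ha⟩]
      simp [pvScan]
    · have hbranch : ¬ (i ≠ 0 ∧ a = t.length - 1) := by
        rintro ⟨-, ha⟩; omega
      rw [if_neg hbranch]
      exact ih (a + 1) (by omega) hm

theorem pvRowAt_zero (T : List (List Int)) (row : List Int) : pvRowAt T 0 row = row := by
  simp [pvRowAt]

theorem pvRowAt_length (T : List (List Int)) (i : Nat) (row : List Int) (h : i ≤ row.length) :
    (pvRowAt T i row).length = row.length := by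
  have := pv_filter_len_le T i
  simp [pvRowAt]
  omega

theorem pvRowAt_getD (T : List (List Int)) (i : Nat) (row : List Int) (h : i < row.length) :
    (pvRowAt T i row).getD i 0 = row.getD i 0 := by
  have hlen : (List.replicate (i - ((List.range i).filter (pvNz T)).length) (0 : Int)
      ++ ((List.range i).filter (pvNz T)).map (fun c => row.getD c 0)).length = i := by
    have := pv_filter_len_le T i
    simp; omega
  have h2 := pv_getD_append _ (row.drop i) i hlen
  rw [pvRowAt, h2]
  simp [List.getD, List.getElem?_drop]

theorem pv_map_getD (T : List (List Int)) (f : List Int → List Int) (j : Nat)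
    (hj : j < T.length) : (T.map f).getD j [] = f (T.getD j []) := by
  simp [List.getD, List.getElem?_map, List.getElem?_eq_getElem hj]

theorem pvNz_true (T : List (List Int)) (i : Nat) :
    pvNz T i = true ↔ ∃ j, j < T.length ∧ (T.getD j []).getD i 0 ≠ 0 := by
  simp [pvNz, List.any_eq_true, List.mem_range]

theorem pvNz_false (T : List (List Int)) (i : Nat) (h : pvNz T i = false) :
    ∀ j, j < T.length → (T.getD j []).getD i 0 = 0 := by
  intro j hj
  by_contra hne
  rw [← Bool.not_eq_true, pvNz_true] at h
  exact h ⟨j, hj, hne⟩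

theorem pvRowAt_succ_nz (T : List (List Int)) (i : Nat) (row : List Int)
    (h : pvNz T i = true) (hlen : i < row.length) :
    pvRowAt T i row = pvRowAt T (i + 1) row := by
  have hfl := pv_filter_len_le T i
  have hfilter : (List.range (i + 1)).filter (pvNz T)
      = (List.range i).filter (pvNz T) ++ [i] := by
    rw [List.range_succ, List.filter_append]
    simp [h]
  have hdrop : row.drop i = row.getD i 0 :: row.drop (i + 1) := by
    rw [List.drop_eq_getElem_cons hlen]
    simp [List.getD, List.getElem?_eq_getElem hlen]
  rw [pvRowAt, pvRowAt, hfilter, hdrop]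
  simp [List.append_assoc]
  try omega

theorem pvRowAt_succ_z (T : List (List Int)) (i : Nat) (row : List Int)
    (h : pvNz T i = false) :
    pvRowAt T (i + 1) row
      = 0 :: (List.replicate (i - ((List.range i).filter (pvNz T)).length) 0
          ++ ((List.range i).filter (pvNz T)).map (fun c => row.getD c 0)
          ++ row.drop (i + 1)) := by
  have hfl := pv_filter_len_le T i
  have hfilter : (List.range (i + 1)).filter (pvNz T) = (List.range i).filter (pvNz T) := by
    rw [List.range_succ, List.filter_append]
    simp [h]
  rw [pvRowAt, hfilter]
  have hz : i + 1 - ((List.range i).filter (pvNz T)).length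
      = (i - ((List.range i).filter (pvNz T)).length) + 1 := by omega
  rw [hz, List.replicate_succ]
  simp

-- one step of A's outer loop, acting on the invariant shape
theorem pv_step (T : List (List Int)) (hPre : ∀ row ∈ T, T.length ≤ row.length)
    (i : Nat) (hi : i < T.length) :
    pvScan i (T.map (pvRowAt T i)) (List.range (T.map (pvRowAt T i)).length)
      = T.map (pvRowAt T (i + 1)) := by
  set t := T.map (pvRowAt T i) with ht
  have hlen : t.length = T.length := by simp [ht]
  have hrowlen : ∀ row ∈ T, i < row.length := fun row hrow =>
    Nat.lt_of_lt_of_le hi (hPre row hrow)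
  have hcol : ∀ j, j < T.length → (t.getD j []).getD i 0 = (T.getD j []).getD i 0 := by
    intro j hj
    rw [ht, pv_map_getD T _ j hj]
    have hmem : T.getD j [] ∈ T := by
      have : T.getD j [] = T[j] := by simp [List.getD, List.getElem?_eq_getElem hj]
      rw [this]; exact List.getElem_mem hj
    exact pvRowAt_getD T i _ (hrowlen _ hmem)
  have hrange : List.range t.length = List.range' 0 t.length := List.range_eq_range'
  cases hnz : pvNz T i with
  | true =>
    obtain ⟨j, hj, hval⟩ := (pvNz_true T i).mp hnz
    have : pvScan i t (List.range' 0 t.length) = t := by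
      apply pvScan_exists i t t.length 0 (by omega)
      exact ⟨j, Nat.zero_le _, by omega, by rw [hcol j hj]; exact hval⟩
    rw [hrange, this, ht]
    exact List.map_congr_left fun row hrow => pvRowAt_succ_nz T i row hnz (hrowlen row hrow)
  | false =>
    have hz : ∀ j, j < t.length → (t.getD j []).getD i 0 = 0 := by
      intro j hj
      rw [hcol j (by omega)]
      exact pvNz_false T i hnz j (by omega)
    by_cases hi0 : i = 0
    · subst hi0
      have : pvScan 0 t (List.range' 0 t.length) = t := pvScan_zero_skip 0 t rfl hz t.length 0 (by omega)
      rw [hrange, this, ht]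
      apply List.map_congr_left
      intro row hrow
      obtain ⟨j, hj, hjr⟩ := List.mem_iff_getElem.mp hrow
      have hrl : 0 < row.length := hrowlen row hrow
      have hrow0 : row.getD 0 0 = 0 := by
        have := pvNz_false T 0 hnz j hj
        have hgd : T.getD j [] = row := by
          simp [List.getD, List.getElem?_eq_getElem hj, hjr]
        rwa [hgd] at this
      rw [pvRowAt_zero, pvRowAt_succ_z T 0 row hnz]
      simp [pvRowAt]
      conv_lhs => rw [← List.take_append_drop 1 row, List.take_one]
      rw [List.head?_eq_getElem?, List.getElem?_eq_getElem hrl]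
      simp [List.getD, List.getElem?_eq_getElem hrl] at hrow0
      simp [hrow0]
    · have hscan : pvScan i t (List.range' 0 t.length) = pvShiftAll t i :=
        pvScan_allzero i t hi0 hz t.length 0 (by omega) (by omega)
      rw [hrange, hscan, pvShiftAll_eq, ht, List.map_map]
      apply List.map_congr_left
      intro row hrow
      obtain ⟨j, hj, hjr⟩ := List.mem_iff_getElem.mp hrow
      have hrl : i + 1 ≤ row.length := Nat.lt_of_lt_of_le hi (hPre row hrow)
      have hfl := pv_filter_len_le T i
      have hlenr : (pvRowAt T i row).length = row.length := pvRowAt_length T i row (by omega)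
      simp only [Function.comp]
      rw [pvShiftRow_eq i (pvRowAt T i row) (Nat.one_le_iff_ne_zero.mpr hi0) (by omega)]
      have hA : pvRowAt T i row
          = (List.replicate (i - ((List.range i).filter (pvNz T)).length) (0 : Int)
              ++ ((List.range i).filter (pvNz T)).map (fun c => row.getD c 0)) ++ row.drop i := by
        rw [pvRowAt]
      have hAlen : (List.replicate (i - ((List.range i).filter (pvNz T)).length) (0 : Int)
          ++ ((List.range i).filter (pvNz T)).map (fun c => row.getD c 0)).length = i := by
        simp; omega
      have htake : (pvRowAt T i row).take i
          = List.replicate (i - ((List.range i).filter (pvNz T)).length) (0 : Int)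
              ++ ((List.range i).filter (pvNz T)).map (fun c => row.getD c 0) := by
        rw [hA]; exact List.take_left' hAlen
      have hdrop : (pvRowAt T i row).drop (i + 1) = row.drop (i + 1) := by
        have hrd : row.drop i = row[i] :: row.drop (i + 1) := List.drop_eq_getElem_cons (by omega)
        have : pvRowAt T i row
            = ((List.replicate (i - ((List.range i).filter (pvNz T)).length) (0 : Int)
                ++ ((List.range i).filter (pvNz T)).map (fun c => row.getD c 0)) ++ [row[i]])
              ++ row.drop (i + 1) := by
          rw [hA, hrd]; simp
        rw [this]
        exact List.drop_left' (by simp; omega)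
      rw [htake, hdrop, pvRowAt_succ_z T i row hnz]
      try simp [List.append_assoc]
  
theorem pv_outer (T : List (List Int)) (hPre : ∀ row ∈ T, T.length ≤ row.length) :
    ∀ i, i ≤ T.length →
      (List.range i).foldl (fun t i => pvScan i t (List.range t.length)) T
        = T.map (pvRowAt T i) := by
  intro i
  induction i with
  | zero =>
    intro _
    simp only [List.range_zero, List.foldl_nil]
    have : T.map (pvRowAt T 0) = T.map id := List.map_congr_left fun row _ => pvRowAt_zero T row
    simp [this]
  | succ k ih =>
    intro hk
    rw [List.range_succ, List.foldl_append, ih (by omega), List.foldl_cons, List.foldl_nil]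
    exact pv_step T hPre k (by omega)

theorem pv_main (T : List (List Int)) (hPre : ∀ row ∈ T, T.length ≤ row.length) :
    shiftToTheRight T = shiftToTheRight_alt T := by
  rw [shiftToTheRight, pv_outer T hPre T.length (le_refl _), shiftToTheRight_alt]
  have hfilter : (List.range T.length).filter
      (fun c => (List.range T.length).any (fun r => (T.getD r []).getD c 0 != 0))
      = (List.range T.length).filter (pvNz T) := rfl
  simp only [hfilter]
  apply List.map_congr_left
  intro row _
  rw [pvRowAt, List.append_assoc]

-- ===== VERDICT (by name: the statement is the Claim_ definition above) =====
theorem shiftToTheRight_spec : Claim_equal_shiftToTheRight := by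
  intro table _ hPre
  unfold Spec_shiftToTheRight
  exact pv_main table hPre
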